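-- pv_equiv track=rewrite | github.com/IrynaT15/hws-py-automation | validator.py | calculate_sum_for_lists
-- ===== SOURCE A (Python) =====
-- def calculate_sum_for_lists(list_1, list_2):
--     sum_num_1 = 0
--     sum_num_2 = 0
--     for num in list_1:
--         if 2 * num > 9:
--             num_1 = 2 * num - 9
--         else:
--             num_1 = 2 * num
--         sum_num_1 += num_1
--     for num in list_2:
--         sum_num_2 += num
--     return sum_num_1, sum_num_2
-- ===== SOURCE B (Python) =====
-- def calculate_sum_for_lists(list_1, list_2):
--     total = sum(list_1)
--     k = sum(1 for num in list_1 if 2 * num > 9)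
--     return 2 * total - 9 * k, sum(list_2)
-- ===== Notes on version B (the rewrite author's own statement) =====
-- stated objective: simpler
-- what changed: Replaced the per-element branch accumulation by the closed form 2*sum(list_1) - 9*count(2*num>9) plus sum(list_2), using builtin aggregates instead of an explicit branching loop.
import Mathlib
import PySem

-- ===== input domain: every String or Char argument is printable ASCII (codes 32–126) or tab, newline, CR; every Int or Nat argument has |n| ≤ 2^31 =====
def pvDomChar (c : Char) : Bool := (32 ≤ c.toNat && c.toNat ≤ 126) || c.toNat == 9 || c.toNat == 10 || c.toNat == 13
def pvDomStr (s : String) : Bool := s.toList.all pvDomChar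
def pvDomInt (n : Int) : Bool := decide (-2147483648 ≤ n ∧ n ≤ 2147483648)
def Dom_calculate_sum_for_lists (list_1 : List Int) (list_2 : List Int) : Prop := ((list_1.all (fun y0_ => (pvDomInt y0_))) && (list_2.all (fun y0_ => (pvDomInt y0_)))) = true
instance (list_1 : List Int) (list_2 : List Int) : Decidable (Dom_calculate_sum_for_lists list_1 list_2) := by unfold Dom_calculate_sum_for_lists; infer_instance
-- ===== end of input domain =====

-- ===== PORT A =====
-- B replaces A's branching loop by the closed form 2*sum - 9*count(2*num>9); simpler, same cost.
def calculate_sum_for_lists (list_1 : List Int) (list_2 : List Int) : Int × Int :=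
  let sum_num_1 := list_1.foldl (fun acc num =>
    acc + (if 2 * num > 9 then 2 * num - 9 else 2 * num)) 0
  let sum_num_2 := list_2.foldl (fun acc num => acc + num) 0
  (sum_num_1, sum_num_2)

-- ===== PORT B =====
def calculate_sum_for_lists_alt (list_1 : List Int) (list_2 : List Int) : Int × Int :=
  let total := list_1.sum
  let k : Int := (list_1.countP (fun num => 2 * num > 9) : Int)
  (2 * total - 9 * k, list_2.sum)

-- ===== PRECONDITION & SPEC =====
def Spec_calculate_sum_for_lists (list_1 : List Int) (list_2 : List Int) (out : Int × Int) : Prop := out = calculate_sum_for_lists_alt list_1 list_2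
instance (list_1 : List Int) (list_2 : List Int) (out : Int × Int) : Decidable (Spec_calculate_sum_for_lists list_1 list_2 out) := by unfold Spec_calculate_sum_for_lists; infer_instance

-- ===== CLAIM (what is proved, stated in full; the proofs are below) =====
def Claim_equal_calculate_sum_for_lists : Prop := ∀ (list_1 : List Int) (list_2 : List Int), Dom_calculate_sum_for_lists list_1 list_2 → Spec_calculate_sum_for_lists list_1 list_2 (calculate_sum_for_lists list_1 list_2)

-- ===== LEMMAS AND PROOFS =====

-- ===== VERDICT (by name: the statement is the Claim_ definition above) =====
theorem foldlA_closed (l : List Int) (a : Int) :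
    l.foldl (fun acc num => acc + (if 2 * num > 9 then 2 * num - 9 else 2 * num)) a
      = a + 2 * l.sum - 9 * (l.countP (fun num => 2 * num > 9) : Int) := by
  induction l generalizing a with
  | nil => simp
  | cons x xs ih =>
    simp only [List.foldl_cons, List.sum_cons, List.countP_cons, ih]
    by_cases h : 2 * x > 9 <;> simp [h] <;> ring

theorem foldl_add_sum (l : List Int) (a : Int) :
    l.foldl (fun acc num => acc + num) a = a + l.sum := by
  induction l generalizing a with
  | nil => simp
  | cons x xs ih => simp [ih]; ring

theorem calculate_sum_for_lists_spec : Claim_equal_calculate_sum_for_lists := by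
  intro l1 l2 _
  show _ = _
  simp [calculate_sum_for_lists, calculate_sum_for_lists_alt, foldlA_closed, foldl_add_sum]
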